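-- pv_equiv track=rewrite | github.com/ermancekic/CVulnPredictor | src/modules/calculate_results.py | _normalize_loc_path
-- ===== SOURCE A (Python) =====
-- def _normalize_loc_path(p: str) -> str:
--     """
--     Removes everything up to and including the last '..' sequence and normalizes slashes.
--     Examples:
--       '/a/b/../../src/x.h' -> 'src/x.h'
--       'a/../b/../c/d.h'    -> 'c/d.h'
--       'src/x.h'            -> 'src/x.h'
--     """
--     if not p:
--         return ""
--     # Uniform slashes
--     p = p.replace('\\', '/')
--     # Components without empty/'.' segments
--     parts = [seg for seg in p.split('/') if seg not in ("", ".")]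
--     # Index of the last '..'
--     last_dd = -1
--     for i, seg in enumerate(parts):
--         if seg == "..":
--             last_dd = i
--     # Cut off everything up to the last '..'
--     if last_dd != -1:
--         parts = parts[last_dd + 1:]
--     # Reassemble
--     return "/".join(parts)
-- ===== SOURCE B (Python) =====
-- def _normalize_loc_path(p: str) -> str:
--     if not p:
--         return ""
--     out = []
--     for seg in p.replace('\\', '/').split('/'):
--         if seg == "..":
--             out = []
--         elif seg not in ("", "."):
--             out.append(seg)
--     return "/".join(out)
-- ===== Notes on version B (the rewrite author's own statement) =====
-- stated objective: simpler
-- what changed: Replaces the filter pass plus enumerate-scan for the index of the last parent-directory segment plus slice with a single forward pass over the raw segments that resets an accumulator list on a parent-directory segment and appends otherwise.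
import Mathlib
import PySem

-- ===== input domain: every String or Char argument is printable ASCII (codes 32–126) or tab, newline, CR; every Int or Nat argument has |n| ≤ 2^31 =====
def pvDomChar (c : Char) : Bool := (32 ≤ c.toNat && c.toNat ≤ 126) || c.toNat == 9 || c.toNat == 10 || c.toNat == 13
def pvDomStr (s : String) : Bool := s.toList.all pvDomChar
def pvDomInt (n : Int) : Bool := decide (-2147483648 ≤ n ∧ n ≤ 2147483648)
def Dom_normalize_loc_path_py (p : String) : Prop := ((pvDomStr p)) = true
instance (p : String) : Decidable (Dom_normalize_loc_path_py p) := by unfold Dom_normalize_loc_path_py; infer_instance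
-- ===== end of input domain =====

-- B replaces A's filter pass + enumerate-scan for the last '..' index + slice by a single
-- forward pass that resets an accumulator list on '..' (objective: simpler decomposition).


-- ===== PORT A =====
def normalize_loc_path_py (p : String) : String :=
  if p = "" then ""
  else
    -- p = p.replace('\\', '/')
    let q := PySem.Str.replace p "\\" "/"
    -- parts = [seg for seg in p.split('/') if seg not in ("", ".")]
    -- sep "/" is a nonempty literal, so split? is always `some`
    let parts := ((PySem.Str.split? q "/").getD []).filter (fun seg => !(seg == "" || seg == "."))
    -- last_dd = -1; for i, seg in enumerate(parts): if seg == "..": last_dd = i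
    let last_dd : Int := (PySem.List.enumerate parts).foldl
      (fun ld p => if p.2 == ".." then p.1 else ld) (-1)
    -- if last_dd != -1: parts = parts[last_dd + 1:]
    let parts := if last_dd ≠ -1 then PySem.List.slice parts (some (last_dd + 1)) none else parts
    PySem.Str.join "/" parts

-- ===== PORT B =====
def normalize_loc_path_py_alt (p : String) : String :=
  if p = "" then ""
  else
    let out : List String :=
      ((PySem.Str.split? (PySem.Str.replace p "\\" "/") "/").getD []).foldl
        (fun out seg =>
          if seg == ".." then []
          else if !(seg == "" || seg == ".") then out ++ [seg]
          else out) []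
    PySem.Str.join "/" out

-- ===== PRECONDITION & SPEC =====
def Spec_normalize_loc_path_py (p : String) (out : String) : Prop := out = normalize_loc_path_py_alt p
instance (p : String) (out : String) : Decidable (Spec_normalize_loc_path_py p out) := by unfold Spec_normalize_loc_path_py; infer_instance

-- ===== CLAIM (what is proved, stated in full; the proofs are below) =====
def Claim_equal_normalize_loc_path_py : Prop := ∀ (p : String), Dom_normalize_loc_path_py p → Spec_normalize_loc_path_py p (normalize_loc_path_py p)

-- ===== LEMMAS AND PROOFS =====

-- the last-'..'-index loop of A, on an already filtered list
def pvLastDD (l : List String) : Int :=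
  (PySem.List.enumerate l).foldl (fun ld p => if p.2 == ".." then p.1 else ld) (-1)

-- the reset-accumulator loop of B
def pvReset (l : List String) (acc : List String) : List String :=
  l.foldl (fun out seg => if seg == ".." then [] else out ++ [seg]) acc

lemma pvLastDD_append (m : List String) (s : String) :
    pvLastDD (m ++ [s]) = if s == ".." then (m.length : Int) else pvLastDD m := by
  simp [pvLastDD, PySem.List.enumerate_append, List.foldl_append]

lemma pvLastDD_bounds (m : List String) : -1 ≤ pvLastDD m ∧ pvLastDD m < m.length := by
  induction m using List.reverseRecOn with
  | nil => simp [pvLastDD]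
  | append_singleton m s ih =>
    rw [pvLastDD_append]
    rcases ih with ⟨ih1, ih2⟩
    by_cases h : (s == "..") = true
    · rw [if_pos h]
      simp only [List.length_append, List.length_cons, List.length_nil]
      push_cast
      omega
    · rw [if_neg h]
      simp only [List.length_append, List.length_cons, List.length_nil]
      push_cast
      omega

-- B's reset loop with the skip branch equals the reset loop on the filtered list
lemma pvReset_cons (s : String) (l acc : List String) :
    pvReset (s :: l) acc = pvReset l (if s == ".." then [] else acc ++ [s]) := rfl

lemma pvReset_filter (l : List String) (acc : List String) :
    l.foldl (fun out seg =>
        if seg == ".." then []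
        else if !(seg == "" || seg == ".") then out ++ [seg]
        else out) acc
      = pvReset (l.filter (fun seg => !(seg == "" || seg == "."))) acc := by
  induction l generalizing acc with
  | nil => simp [pvReset]
  | cons s t ih =>
    simp only [List.foldl_cons, List.filter_cons]
    by_cases h1 : s = ".."
    · rw [if_pos (show (s == "..") = true by simp [h1]),
        if_pos (show (!(s == "" || s == ".")) = true by simp [h1]),
        pvReset_cons, if_pos (show (s == "..") = true by simp [h1])]
      exact ih []
    · by_cases h2 : s = "" ∨ s = "."
      · rw [if_neg (show ¬ (s == "..") = true by simp [h1]),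
          if_neg (show ¬ (!(s == "" || s == ".")) = true by rcases h2 with h2 | h2 <;> simp [h2]),
          if_neg (show ¬ (!(s == "" || s == ".")) = true by rcases h2 with h2 | h2 <;> simp [h2])]
        exact ih acc
      · rw [if_neg (show ¬ (s == "..") = true by simp [h1]),
          if_pos (show (!(s == "" || s == ".")) = true by simp; tauto),
          if_pos (show (!(s == "" || s == ".")) = true by simp; tauto),
          pvReset_cons, if_neg (show ¬ (s == "..") = true by simp [h1])]
        exact ih (acc ++ [s])

-- A's cut-after-last-'..' equals B's reset loop, on the filtered list
lemma pvCut_eq_reset (m : List String) :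
    (if pvLastDD m ≠ -1 then PySem.List.slice m (some (pvLastDD m + 1)) none else m)
      = pvReset m [] := by
  induction m using List.reverseRecOn with
  | nil => simp [pvLastDD, pvReset]
  | append_singleton m s ih =>
    have hb := pvLastDD_bounds m
    by_cases hs : s = ".."
    · have e : pvLastDD (m ++ [s]) = (m.length : Int) := by
        rw [pvLastDD_append, if_pos (by simp [hs])]
      rw [e, if_pos (show (m.length : Int) ≠ -1 by omega),
        PySem.List.slice_from _ (by omega),
        show ((m.length : Int) + 1).toNat = m.length + 1 by omega,
        List.drop_eq_nil_of_le (by simp)]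
      simp [pvReset, List.foldl_append, hs]
    · have e : pvLastDD (m ++ [s]) = pvLastDD m := by
        rw [pvLastDD_append, if_neg (by simp [hs])]
      have hstep : pvReset (m ++ [s]) [] = pvReset m [] ++ [s] := by
        simp [pvReset, List.foldl_append, hs]
      rw [e, hstep]
      by_cases hm : pvLastDD m = -1
      · rw [if_neg (by simp [hm])]
        rw [if_neg (by simp [hm])] at ih
        rw [← ih]
      · rw [if_pos hm] at ih ⊢
        rw [PySem.List.slice_from _ (by omega)] at ih ⊢
        rw [List.drop_append_of_le_length (by omega), ih]

-- ===== VERDICT (by name: the statement is the Claim_ definition above) =====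
theorem normalize_loc_path_py_spec : Claim_equal_normalize_loc_path_py := by
  intro p _
  unfold Spec_normalize_loc_path_py normalize_loc_path_py normalize_loc_path_py_alt
  by_cases hp : p = ""
  · simp [hp]
  · simp only [hp, if_false]
    rw [pvReset_filter, ← pvCut_eq_reset]
    rfl
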